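-- pv_equiv track=rewrite | github.com/lionglan624-blip/era-devkit | src/tools/python/ac_ops.py | split_pipe_row
-- ===== SOURCE A (Python) =====
-- def split_pipe_row(line: str) -> list[str]:
--     """
--     Split a markdown pipe-table row into cell strings, respecting quoted regions.
--     Handles in_quotes (double-quote) and in_backticks state machines.
--     Escaped pipes (odd backslashes before |) are included as content.
--     Returns a list of stripped cell contents.
--     """
--     parts = []
--     current_part = ""
--     in_quotes = False
--     in_backticks = False
--     i = 0
--     while i < len(line):
--         char = line[i]
--         if char == '"' and not in_backticks:
--             # Count consecutive backslashes before the quote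
--             num_backslashes = 0
--             j = i - 1
--             while j >= 0 and line[j] == '\\':
--                 num_backslashes += 1
--                 j -= 1
--             # Even number of backslashes means quote is NOT escaped
--             if num_backslashes % 2 == 0:
--                 in_quotes = not in_quotes
--             current_part += char
--         elif char == '`' and not in_quotes:
--             in_backticks = not in_backticks
--             current_part += char
--         elif char == '|' and not in_quotes and not in_backticks:
--             # Check if pipe is backslash-escaped
--             num_backslashes = 0
--             j = i - 1
--             while j >= 0 and line[j] == '\\':
--                 num_backslashes += 1
--                 j -= 1
--             if num_backslashes % 2 == 0:
--                 # Not escaped - split here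
--                 parts.append(current_part.strip())
--                 current_part = ""
--             else:
--                 # Escaped pipe - include as content (without the escaping backslash)
--                 current_part = current_part[:-1] + char
--         else:
--             current_part += char
--         i += 1
--     # Add final part (always append to preserve trailing empty string after last |)
--     parts.append(current_part.strip())
--     return parts
-- ===== SOURCE B (Python) =====
-- def split_pipe_row(line: str) -> list[str]:
--     """Single forward pass: a running counter of the backslash run ending at the
--     previous character replaces A's backward rescans."""
--     parts = []
--     cur = []  # characters of the current cell
--     in_quotes = False
--     in_backticks = False
--     bs = 0  # length of the run of backslashes ending just before this char
--     for ch in line: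
--         if ch == '"' and not in_backticks:
--             if bs % 2 == 0:
--                 in_quotes = not in_quotes
--             cur.append(ch)
--         elif ch == '`' and not in_quotes:
--             in_backticks = not in_backticks
--             cur.append(ch)
--         elif ch == '|' and not in_quotes and not in_backticks:
--             if bs % 2 == 0:
--                 parts.append(''.join(cur).strip())
--                 cur = []
--             else:
--                 cur[-1] = ch  # drop the escaping backslash, keep the pipe
--         else:
--             cur.append(ch)
--         bs = bs + 1 if ch == '\\' else 0
--     parts.append(''.join(cur).strip())
--     return parts
-- ===== Notes on version B (the rewrite author's own statement) =====
-- stated objective: faster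
-- what changed: Replaces A's backward rescan of preceding backslashes at every quote/pipe with a single running backslash-run counter updated once per character, making the split one linear pass.
import Mathlib
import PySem

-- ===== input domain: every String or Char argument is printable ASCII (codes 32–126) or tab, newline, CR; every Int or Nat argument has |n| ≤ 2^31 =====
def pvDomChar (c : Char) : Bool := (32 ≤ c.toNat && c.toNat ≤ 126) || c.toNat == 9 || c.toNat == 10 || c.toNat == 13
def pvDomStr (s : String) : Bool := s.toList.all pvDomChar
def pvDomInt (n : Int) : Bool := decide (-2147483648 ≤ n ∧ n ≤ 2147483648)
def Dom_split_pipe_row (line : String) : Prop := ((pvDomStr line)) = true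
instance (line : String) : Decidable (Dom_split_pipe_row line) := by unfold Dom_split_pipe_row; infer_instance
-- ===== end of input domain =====

-- B replaces A's backward rescan for preceding backslashes with a running
-- backslash-run counter, one forward pass (objective: faster, asymptotic).

-- ===== PORT A =====
-- backward scan: number of consecutive '\'s at positions n-1, n-2, … (A's inner while loop, j = n-1)
def pvCountBS (cs : List Char) : Nat → Int
  | 0 => 0
  | n + 1 => if cs[n]? = some '\\' then pvCountBS cs n + 1 else 0

-- A's main while loop over index i
def pvLoopA (cs : List Char) (i : Nat) (parts : List String) (cur : List Char)
    (inq inb : Bool) : List String :=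
  if h : i < cs.length then
    let c := cs[i]
    if c = '"' ∧ inb = false then
      pvLoopA cs (i + 1) parts (cur ++ [c])
        (if pvCountBS cs i % 2 = 0 then !inq else inq) inb
    else if c = '`' ∧ inq = false then
      pvLoopA cs (i + 1) parts (cur ++ [c]) inq (!inb)
    else if c = '|' ∧ inq = false ∧ inb = false then
      if pvCountBS cs i % 2 = 0 then
        pvLoopA cs (i + 1) (parts ++ [PySem.Str.strip (String.ofList cur)]) [] inq inb
      else
        pvLoopA cs (i + 1) parts (cur.dropLast ++ [c]) inq inb
    else
      pvLoopA cs (i + 1) parts (cur ++ [c]) inq inb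
  else
    parts ++ [PySem.Str.strip (String.ofList cur)]
termination_by cs.length - i

def split_pipe_row (line : String) : List String :=
  pvLoopA line.toList 0 [] [] false false

-- ===== PORT B =====
-- B's for loop over the characters, carrying the running backslash counter bs
def pvLoopB (parts : List String) (cur : List Char) (inq inb : Bool) (bs : Int) :
    List Char → List String
  | [] => parts ++ [PySem.Str.strip (String.ofList cur)]
  | c :: rest =>
    if c = '"' ∧ inb = false then
      pvLoopB parts (cur ++ [c]) (if bs % 2 = 0 then !inq else inq) inb
        (if c = '\\' then bs + 1 else 0) rest
    else if c = '`' ∧ inq = false then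
      pvLoopB parts (cur ++ [c]) inq (!inb) (if c = '\\' then bs + 1 else 0) rest
    else if c = '|' ∧ inq = false ∧ inb = false then
      if bs % 2 = 0 then
        pvLoopB (parts ++ [PySem.Str.strip (String.ofList cur)]) [] inq inb
          (if c = '\\' then bs + 1 else 0) rest
      else
        pvLoopB parts (cur.dropLast ++ [c]) inq inb (if c = '\\' then bs + 1 else 0) rest
    else
      pvLoopB parts (cur ++ [c]) inq inb (if c = '\\' then bs + 1 else 0) rest

def split_pipe_row_alt (line : String) : List String :=
  pvLoopB [] [] false false 0 line.toList

-- ===== PRECONDITION & SPEC =====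
def Spec_split_pipe_row (line : String) (out : List String) : Prop := out = split_pipe_row_alt line
instance (line : String) (out : List String) : Decidable (Spec_split_pipe_row line out) := by unfold Spec_split_pipe_row; infer_instance

-- ===== CLAIM (what is proved, stated in full; the proofs are below) =====
def Claim_equal_split_pipe_row : Prop := ∀ (line : String), Dom_split_pipe_row line → Spec_split_pipe_row line (split_pipe_row line)

-- ===== LEMMAS AND PROOFS =====

-- B's running counter equals A's backward scan result at each position
lemma pvCountBS_succ (cs : List Char) (i : Nat) (h : i < cs.length) :
    pvCountBS cs (i + 1) = if cs[i] = '\\' then pvCountBS cs i + 1 else 0 := by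
  have hc : cs[i]? = some cs[i] := List.getElem?_eq_getElem h
  simp only [pvCountBS, hc, Option.some.injEq]

lemma pvLoop_agree (cs : List Char) :
    ∀ (n i : Nat), cs.length - i = n →
    ∀ (parts : List String) (cur : List Char) (inq inb : Bool),
    pvLoopA cs i parts cur inq inb =
      pvLoopB parts cur inq inb (pvCountBS cs i) (cs.drop i) := by
  intro n
  induction n with
  | zero =>
    intro i hi parts cur inq inb
    have h : ¬ i < cs.length := by omega
    rw [pvLoopA, dif_neg h, List.drop_of_length_le (by omega), pvLoopB]
  | succ n ih =>
    intro i hi parts cur inq inb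
    have h : i < cs.length := by omega
    have key := fun parts cur inq inb => ih (i + 1) (by omega) parts cur inq inb
    have hbs := pvCountBS_succ cs i h
    rw [pvLoopA, dif_pos h, ← List.getElem_cons_drop h]
    simp only [pvLoopB]
    split_ifs <;> rw [key, hbs] <;> simp_all

-- ===== VERDICT (by name: the statement is the Claim_ definition above) =====
theorem split_pipe_row_spec : Claim_equal_split_pipe_row := by
  intro line _
  unfold Spec_split_pipe_row split_pipe_row split_pipe_row_alt
  simpa using pvLoop_agree line.toList line.toList.length 0 rfl [] [] false false
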